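-- pv_equiv track=rewrite | github.com/ckh666666/Shenzhen_Camera_position1 | backend/app.py | merge_polyline_segments
-- ===== SOURCE A (Python) =====
-- def merge_polyline_segments(segments):
--     merged = []
--     for segment in segments:
--         for point in segment:
--             if merged and point[0] == merged[-1][0] and point[1] == merged[-1][1]:
--                 continue
--             merged.append(point)
--     return merged
-- ===== SOURCE B (Python) =====
-- def merge_polyline_segments(segments):
--     flat = [p for seg in segments for p in seg]
--     return flat[:1] + [p for prev, p in zip(flat, flat[1:])
--                        if (p[0], p[1]) != (prev[0], prev[1])]
-- ===== Notes on version B (the rewrite author's own statement) =====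
-- stated objective: idiomatic
-- what changed: Replaces the nested loop that compares each point against the output's last element with a flatten pass followed by a zip-adjacent filter over the flat point stream (keep the first point, then keep each point that differs from its predecessor).
import Mathlib
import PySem

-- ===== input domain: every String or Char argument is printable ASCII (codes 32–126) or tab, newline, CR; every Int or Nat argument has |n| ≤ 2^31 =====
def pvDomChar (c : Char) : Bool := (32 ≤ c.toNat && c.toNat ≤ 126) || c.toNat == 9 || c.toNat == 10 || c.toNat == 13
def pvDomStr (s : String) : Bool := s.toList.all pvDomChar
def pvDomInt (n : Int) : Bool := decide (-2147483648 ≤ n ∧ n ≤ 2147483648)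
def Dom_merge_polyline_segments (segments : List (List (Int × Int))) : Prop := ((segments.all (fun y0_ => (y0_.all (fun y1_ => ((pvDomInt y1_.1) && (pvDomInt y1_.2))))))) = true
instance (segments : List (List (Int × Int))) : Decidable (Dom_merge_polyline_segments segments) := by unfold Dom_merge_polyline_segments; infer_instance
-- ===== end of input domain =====

-- B replaces the nested loop comparing against merged[-1] with a flatten pass
-- plus a zip-adjacent filter over the flat point stream (idiomatic, same cost).

-- ===== PORT A =====
-- one iteration of A's inner loop body: append `point` unless it equals merged's last
def pvMergeStep (merged : List (Int × Int)) (point : Int × Int) : List (Int × Int) :=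
  match merged.getLast? with
  | some q => if point.1 = q.1 ∧ point.2 = q.2 then merged else merged ++ [point]
  | none => merged ++ [point]

def merge_polyline_segments (segments : List (List (Int × Int))) : List (Int × Int) :=
  segments.foldl (fun merged segment => segment.foldl pvMergeStep merged) []

-- ===== PORT B =====
def merge_polyline_segments_alt (segments : List (List (Int × Int))) : List (Int × Int) :=
  let flat := segments.flatMap (fun seg => seg)
  flat.take 1 ++
    (((flat.zip (flat.drop 1)).filter
        (fun q => !(q.2.1 = q.1.1 ∧ q.2.2 = q.1.2 : Bool))).map Prod.snd)

-- ===== PRECONDITION & SPEC =====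
def Spec_merge_polyline_segments (segments : List (List (Int × Int))) (out : List (Int × Int)) : Prop := out = merge_polyline_segments_alt segments
instance (segments : List (List (Int × Int))) (out : List (Int × Int)) : Decidable (Spec_merge_polyline_segments segments out) := by unfold Spec_merge_polyline_segments; infer_instance

-- ===== CLAIM (what is proved, stated in full; the proofs are below) =====
def Claim_equal_merge_polyline_segments : Prop := ∀ (segments : List (List (Int × Int))), Dom_merge_polyline_segments segments → Spec_merge_polyline_segments segments (merge_polyline_segments segments)

-- ===== LEMMAS AND PROOFS =====

-- A's double loop over segments is the single loop over the flattened stream.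
theorem pv_foldl_flat (segments : List (List (Int × Int))) (init : List (Int × Int)) :
    segments.foldl (fun merged segment => segment.foldl pvMergeStep merged) init
      = (segments.flatMap (fun seg => seg)).foldl pvMergeStep init := by
  induction segments generalizing init with
  | nil => simp
  | cons s ss ih => simp [List.flatMap_cons, List.foldl_append, ih]

-- Main invariant: once something has been emitted (last element `a`), the rest of
-- A's loop produces exactly B's zip-adjacent filter of `xs` seeded with `a`.
theorem pv_foldl_tail (xs : List (Int × Int)) (rest : List (Int × Int)) (a : Int × Int) :
    List.foldl pvMergeStep (rest ++ [a]) xs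
      = rest ++ a :: (((a :: xs).zip xs).filter
          (fun q => !(q.2.1 = q.1.1 ∧ q.2.2 = q.1.2 : Bool))).map Prod.snd := by
  induction xs generalizing rest a with
  | nil => simp
  | cons x xs ih =>
    by_cases h : x.1 = a.1 ∧ x.2 = a.2
    · have hxa : x = a := Prod.ext h.1 h.2
      subst hxa
      simp only [List.foldl_cons, pvMergeStep, List.getLast?_concat, and_self, if_true]
      rw [ih]
      simp
    · simp only [List.foldl_cons, pvMergeStep, List.getLast?_concat, if_neg h]
      rw [show rest ++ [a] ++ [x] = (rest ++ [a]) ++ [x] by simp, ih]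
      rcases not_and_or.mp h with h1 | h1 <;> simp [h1]

theorem pv_main (segments : List (List (Int × Int))) :
    merge_polyline_segments segments = merge_polyline_segments_alt segments := by
  unfold merge_polyline_segments merge_polyline_segments_alt
  rw [pv_foldl_flat]
  cases hf : segments.flatMap (fun seg => seg) with
  | nil => simp
  | cons x xs =>
    have h0 : List.foldl pvMergeStep ([] : List (Int × Int)) (x :: xs)
        = List.foldl pvMergeStep ([] ++ [x]) xs := by
      simp [pvMergeStep]
    rw [h0, pv_foldl_tail]
    simp

-- ===== VERDICT (by name: the statement is the Claim_ definition above) =====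
theorem merge_polyline_segments_spec : Claim_equal_merge_polyline_segments := by
  intro segments _
  exact pv_main segments
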